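-- pv_equiv track=rewrite | github.com/Dontcallcook/py110 | test.py | max_sum_of_prime_sub
-- ===== SOURCE A (Python) =====
-- def is_prime(num):
--     if num <= 1:
--         return False
--
--     for value in range(2, num):
--         if num % value == 0:
--             return False
--
--     return True
--
-- def all_prime(lst):
--     for num in lst:
--         if not is_prime(num):
--             return False
--
--     return True
--
-- def max_sum_of_prime_sub(lst):
--     subs = []
--
--     for i in range(len(lst)):
--         for j in range(i + 1, len(lst) + 1):
--             current_sub = lst[i:j]
--             if all_prime(current_sub):
--                 subs.append(current_sub)
--
--     return max(subs, key=sum)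
-- ===== SOURCE B (Python) =====
-- def _is_prime(num):
--     return num >= 2 and all(num % d != 0 for d in range(2, num))
--
-- def max_sum_of_prime_sub(lst):
--     # single pass: collect maximal runs of consecutive primes; since primes are
--     # positive, the best all-prime subarray is a whole run; max picks the first
--     # run with maximal sum, exactly as A's enumeration order does.
--     runs = []
--     current = []
--     for num in lst:
--         if _is_prime(num):
--             current.append(num)
--         else:
--             if current:
--                 runs.append(current)
--             current = []
--     if current:
--         runs.append(current)
--     return max(runs, key=sum)
-- ===== Notes on version B (the rewrite author's own statement) =====
-- stated objective: faster
-- what changed: Instead of enumerating all O(n^2) contiguous subarrays, checking each for all-prime and taking max by sum, B makes one pass collecting the maximal runs of consecutive primes and returns the first run with maximal sum (primes are positive, so a whole run always beats its proper subarrays and ties resolve to the earlier run, matching Python max's first-maximum rule).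
import Mathlib
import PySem

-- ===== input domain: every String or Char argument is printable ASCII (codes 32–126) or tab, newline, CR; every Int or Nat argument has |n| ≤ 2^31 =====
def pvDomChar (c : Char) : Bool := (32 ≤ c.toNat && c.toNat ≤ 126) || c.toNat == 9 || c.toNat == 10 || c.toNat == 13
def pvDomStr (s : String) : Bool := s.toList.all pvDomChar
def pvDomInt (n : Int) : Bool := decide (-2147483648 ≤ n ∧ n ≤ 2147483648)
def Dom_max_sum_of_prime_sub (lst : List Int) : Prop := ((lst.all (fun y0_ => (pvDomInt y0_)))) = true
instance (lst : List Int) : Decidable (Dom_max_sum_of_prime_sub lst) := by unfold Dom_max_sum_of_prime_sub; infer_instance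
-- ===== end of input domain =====

-- B replaces A's enumeration of all contiguous subarrays by a single pass over the
-- maximal runs of consecutive primes (objective: faster, asymptotically fewer scans).

-- ===== PORT A =====
-- 'for value in range(2, num): if num % value == 0: return False' — the range is
-- consumed lazily with an early return, so it is ported as a counting loop (exact:
-- same iterates, same early exit), not as a materialized list.
def pvPrimeLoopA (num v : Int) : Bool :=
  if h : v < num then
    if PySem.Int.mod num v == 0 then false else pvPrimeLoopA num (v + 1)
  else true
termination_by (num - v).toNat
decreasing_by omega

def pvIsPrime (num : Int) : Bool :=
  if num ≤ 1 then false
  else pvPrimeLoopA num 2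

def pvAllPrime (lst : List Int) : Bool := lst.all (fun num => pvIsPrime num)

def max_sum_of_prime_sub (lst : List Int) : List Int :=
  let subs : List (List Int) :=
    (PySem.List.pyRange 0 (lst.length : Int) 1).foldl (fun subs i =>
      (PySem.List.pyRange (i + 1) ((lst.length : Int) + 1) 1).foldl (fun subs j =>
        let current := PySem.List.slice lst (some i) (some j)
        if pvAllPrime current then subs ++ [current] else subs) subs) []
  -- max(subs, key=sum); raises ValueError when subs is empty (excluded by Pre_)
  (PySem.List.max? subs (fun s => s.sum)).getD []

-- ===== PORT B =====
-- 'all(num % d != 0 for d in range(2, num))' — the generator short-circuits, so it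
-- is ported as a counting loop of conjunctions (exact: same iterates, same early exit).
def pvPrimeLoopB (num d : Int) : Bool :=
  if h : d < num then
    (PySem.Int.mod num d != 0) && pvPrimeLoopB num (d + 1)
  else true
termination_by (num - d).toNat
decreasing_by omega

def pvIsPrimeAlt (num : Int) : Bool :=
  decide (2 ≤ num) && pvPrimeLoopB num 2

def max_sum_of_prime_sub_alt (lst : List Int) : List Int :=
  let st := lst.foldl (fun (st : List (List Int) × List Int) num =>
      if pvIsPrimeAlt num then (st.1, st.2 ++ [num])
      else if st.2 = [] then (st.1, []) else (st.1 ++ [st.2], []))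
    ([], [])
  let runs := if st.2 = [] then st.1 else st.1 ++ [st.2]
  -- max(runs, key=sum); raises ValueError when runs is empty (excluded by Pre_)
  (PySem.List.max? runs (fun s => s.sum)).getD []

-- ===== PRECONDITION & SPEC =====
-- Pre_ excludes exactly the inputs with no prime element: there A's (and B's) max()
-- is applied to an empty list and raises ValueError.
def Pre_max_sum_of_prime_sub (lst : List Int) : Prop := ∃ x ∈ lst, 0 < x ∧ Nat.Prime x.toNat
instance (lst : List Int) : Decidable (Pre_max_sum_of_prime_sub lst) := by
  unfold Pre_max_sum_of_prime_sub; infer_instance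
def pvWitness_max_sum_of_prime_sub : List Int := [4, 2, 3, 6]

def Spec_max_sum_of_prime_sub (lst : List Int) (out : List Int) : Prop := out = max_sum_of_prime_sub_alt lst
instance (lst : List Int) (out : List Int) : Decidable (Spec_max_sum_of_prime_sub lst out) := by unfold Spec_max_sum_of_prime_sub; infer_instance

-- ===== CLAIM (what is proved, stated in full; the proofs are below) =====
def Claim_equal_max_sum_of_prime_sub : Prop := ∀ (lst : List Int), Dom_max_sum_of_prime_sub lst → Pre_max_sum_of_prime_sub lst → Spec_max_sum_of_prime_sub lst (max_sum_of_prime_sub lst)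

-- ===== LEMMAS AND PROOFS =====

-- the two primality tests agree
lemma pvPrimeLoop_eq : ∀ (k : Nat) (num v : Int), (num - v).toNat ≤ k →
    pvPrimeLoopA num v = pvPrimeLoopB num v := by
  intro k
  induction k with
  | zero =>
    intro num v hk
    have hnv : ¬ v < num := by omega
    rw [pvPrimeLoopA, pvPrimeLoopB, dif_neg hnv, dif_neg hnv]
  | succ k ih =>
    intro num v hk
    rw [pvPrimeLoopA, pvPrimeLoopB]
    by_cases hnv : v < num
    · rw [dif_pos hnv, dif_pos hnv]
      cases hm : (PySem.Int.mod num v == 0) with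
      | true =>
        have hf : (PySem.Int.mod num v != 0) = false := by simp [bne, hm]
        simp [hf]
      | false =>
        have ht : (PySem.Int.mod num v != 0) = true := by simp [bne, hm]
        simp only [hm, ht, Bool.true_and, if_false, Bool.false_eq_true]
        exact ih num (v + 1) (by omega)
    · rw [dif_neg hnv, dif_neg hnv]

lemma pvIsPrime_eq_alt (n : Int) : pvIsPrime n = pvIsPrimeAlt n := by
  unfold pvIsPrime pvIsPrimeAlt
  by_cases h : n ≤ 1
  · have h2 : ¬ (2 ≤ n) := by omega
    simp [h, h2]
  · have h2 : 2 ≤ n := by omega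
    simp only [if_neg h, h2, decide_true, Bool.true_and]
    exact pvPrimeLoop_eq (n - 2).toNat n 2 (by omega)

lemma pvIsPrime_two_le {n : Int} (h : pvIsPrime n = true) : 2 ≤ n := by
  unfold pvIsPrime at h
  by_cases h1 : n ≤ 1
  · simp [h1] at h
  · omega

-- first-max-by-sum as a fold with an explicit combiner
def pvCombine (m1 m2 : Option (List Int)) : Option (List Int) :=
  match m1, m2 with
  | none, m => m
  | some a, none => some a
  | some a, some b => if a.sum < b.sum then some b else some a

def pvMax (xs : List (List Int)) : Option (List Int) :=
  xs.foldl (fun acc x => pvCombine acc (some x)) none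

lemma pv_max?_eq (xs : List (List Int)) :
    PySem.List.max? xs (fun s => s.sum) = pvMax xs := by
  unfold PySem.List.max? pvMax
  congr 1
  funext acc x
  cases acc <;> rfl

lemma pvCombine_assoc (a b c : Option (List Int)) :
    pvCombine (pvCombine a b) c = pvCombine a (pvCombine b c) := by
  cases a <;> cases b <;> cases c <;> try rfl
  all_goals
    simp only [pvCombine]
    split_ifs <;>
      first
        | rfl
        | (exfalso; omega)
        | (simp only [pvCombine]; split_ifs <;> first | rfl | (exfalso; omega))

lemma pvMax_foldl (xs : List (List Int)) (acc : Option (List Int)) :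
    xs.foldl (fun acc x => pvCombine acc (some x)) acc = pvCombine acc (pvMax xs) := by
  induction xs generalizing acc with
  | nil => cases acc <;> rfl
  | cons x t ih =>
    have hx : pvMax (x :: t) = pvCombine (some x) (pvMax t) := by
      show List.foldl (fun acc y => pvCombine acc (some y)) (pvCombine none (some x)) t = _
      rw [show pvCombine none (some x) = some x from rfl, ih (some x)]
    simp only [List.foldl_cons]
    rw [ih, hx, ← pvCombine_assoc]

lemma pvMax_append (a b : List (List Int)) :
    pvMax (a ++ b) = pvCombine (pvMax a) (pvMax b) := by
  rw [pvMax, List.foldl_append, ← pvMax, pvMax_foldl]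

lemma pvMax_cons (a : List Int) (t : List (List Int)) :
    pvMax (a :: t) = pvCombine (some a) (pvMax t) := by
  show List.foldl (fun acc y => pvCombine acc (some y)) (pvCombine none (some a)) t = _
  rw [show pvCombine none (some a) = some a from rfl, pvMax_foldl]

lemma pvMax_mem {xs : List (List Int)} {m : List Int} (h : pvMax xs = some m) : m ∈ xs := by
  rw [← pv_max?_eq] at h
  exact PySem.List.max?_mem h

lemma pvCombine_absorb {a b : List Int} (h : b.sum ≤ a.sum) (M : Option (List Int)) :
    pvCombine (some a) (pvCombine (some b) M) = pvCombine (some a) M := by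
  cases M <;> simp only [pvCombine] <;> split_ifs <;>
    first
      | rfl
      | (exfalso; omega)
      | (simp only [pvCombine]; split_ifs <;> first | rfl | (exfalso; omega))

-- mathematical descriptions of the two programs
def pvGrp (t : List Int) : List (List Int) :=
  (List.range (t.takeWhile pvIsPrime).length).map (fun k => t.take (k + 1))

def pvSubsM : List Int → List (List Int)
  | [] => []
  | x :: xs => pvGrp (x :: xs) ++ pvSubsM xs

def pvRunsFrom : List Int → List Int → List (List Int)
  | cur, [] => if cur = [] then [] else [cur]
  | cur, x :: xs =>
    if pvIsPrime x then pvRunsFrom (cur ++ [x]) xs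
    else (if cur = [] then [] else [cur]) ++ pvRunsFrom [] xs

-- ---- B side bridge ----
def pvFinish (st : List (List Int) × List Int) : List (List Int) :=
  if st.2 = [] then st.1 else st.1 ++ [st.2]

lemma pvB_fold (l : List Int) : ∀ (r : List (List Int)) (cur : List Int),
    pvFinish (l.foldl (fun (st : List (List Int) × List Int) num =>
        if pvIsPrimeAlt num then (st.1, st.2 ++ [num])
        else if st.2 = [] then (st.1, []) else (st.1 ++ [st.2], [])) (r, cur))
      = r ++ pvRunsFrom cur l := by
  induction l with
  | nil =>
    intro r cur
    by_cases hc : cur = [] <;> simp [pvFinish, pvRunsFrom, hc]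
  | cons x xs ih =>
    intro r cur
    simp only [List.foldl_cons]
    cases hb : pvIsPrime x with
    | true =>
      have hb' : pvIsPrimeAlt x = true := (pvIsPrime_eq_alt x) ▸ hb
      simp only [hb', if_true]
      rw [ih]
      simp [pvRunsFrom, hb]
    | false =>
      have hb' : pvIsPrimeAlt x = false := (pvIsPrime_eq_alt x) ▸ hb
      by_cases hc : cur = []
      · simp only [hb', Bool.false_eq_true, if_false, hc, ite_true]
        rw [ih]
        simp [pvRunsFrom, hb]
      · simp only [hb', Bool.false_eq_true, if_false, if_neg hc]
        rw [ih]
        simp [pvRunsFrom, hb, hc, List.append_assoc]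

lemma pvRunsFrom_nonnil (l : List Int) : ∀ (cur : List Int), cur ≠ [] →
    pvRunsFrom cur l =
      (cur ++ l.takeWhile pvIsPrime) :: pvRunsFrom [] (l.dropWhile pvIsPrime) := by
  induction l with
  | nil => intro cur hc; simp [pvRunsFrom, hc]
  | cons x xs ih =>
    intro cur hc
    cases hb : pvIsPrime x with
    | true =>
      rw [pvRunsFrom, if_pos hb, ih (cur ++ [x]) (by simp)]
      simp [hb]
    | false =>
      rw [pvRunsFrom, if_neg (by simp [hb]), if_neg hc]
      simp [hb, pvRunsFrom]

-- ---- A side bridge ----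
lemma pvAllPrime_take (t : List Int) : ∀ (m : Nat), m ≤ t.length →
    pvAllPrime (t.take m) = decide (m ≤ (t.takeWhile pvIsPrime).length) := by
  induction t with
  | nil =>
    intro m hm
    have h0 : m = 0 := by simpa using hm
    subst h0
    simp [pvAllPrime]
  | cons a t ih =>
    intro m hm
    cases m with
    | zero => simp [pvAllPrime]
    | succ m =>
      cases hb : pvIsPrime a with
      | true =>
        rw [List.take_succ_cons]
        have : pvAllPrime (a :: t.take m) = pvAllPrime (t.take m) := by
          simp [pvAllPrime, hb]
        rw [this, ih m (by simpa using hm)]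
        simp [hb]
      | false =>
        rw [List.take_succ_cons]
        simp [pvAllPrime, hb]

lemma pv_filter_range_lt (n K : Nat) (h : K ≤ n) :
    (List.range n).filter (fun m => decide (m < K)) = List.range K := by
  induction n with
  | zero => interval_cases K; rfl
  | succ n ih =>
    by_cases hK : K ≤ n
    · rw [List.range_succ, List.filter_append, ih hK]
      simp [show ¬ n < K by omega]
    · have hKe : K = n + 1 := by omega
      subst hKe
      rw [List.filter_eq_self.mpr]
      intro a ha
      simp only [List.mem_range] at ha
      simpa using ha

lemma pvInner (lst : List Int) (k : Nat) (hk : k < lst.length) :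
    ((PySem.List.pyRange ((k : Int) + 1) ((lst.length : Int) + 1) 1).filter
        (fun j => pvAllPrime (PySem.List.slice lst (some (k : Int)) (some j)))).map
      (fun j => PySem.List.slice lst (some (k : Int)) (some j)) = pvGrp (lst.drop k) := by
  have hcast : (((lst.length : Int) + 1) - ((k : Int) + 1)).toNat = lst.length - k := by omega
  rw [PySem.List.pyRange_one, hcast, List.filter_map, List.map_map]
  simp only [Function.comp_def]
  have hslice : ∀ m : ℕ,
      PySem.List.slice lst (some (k : Int)) (some ((k : Int) + 1 + (m : ℕ))) =
        (lst.drop k).take (m + 1) := by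
    intro m
    have h1 : (k : Int) + 1 + (m : ℕ) = (k : Int) + ((m + 1 : ℕ) : Int) := by push_cast; ring
    rw [h1, PySem.List.slice_natCast_add]
  have hKle : ((lst.drop k).takeWhile pvIsPrime).length ≤ lst.length - k := by
    have := ((lst.drop k).takeWhile_sublist pvIsPrime).length_le
    simpa [List.length_drop] using this
  have hfilter :
      (List.range (lst.length - k)).filter
          (fun m => pvAllPrime (PySem.List.slice lst (some (k : Int)) (some ((k : Int) + 1 + (m : ℕ))))) =
        List.range (((lst.drop k).takeWhile pvIsPrime).length) := by
    rw [List.filter_congr (q := fun m => decide (m < ((lst.drop k).takeWhile pvIsPrime).length))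
        (fun m hm => ?_)]
    · exact pv_filter_range_lt _ _ hKle
    · have hm' : m < lst.length - k := List.mem_range.mp hm
      rw [hslice m, pvAllPrime_take (lst.drop k) (m + 1) (by simp [List.length_drop]; omega)]
      exact decide_eq_decide.mpr (by omega)
  rw [hfilter, List.map_congr_left (fun m _ => hslice m)]
  rfl

lemma pvFlat (l : List Int) :
    (List.range l.length).flatMap (fun k => pvGrp (l.drop k)) = pvSubsM l := by
  induction l with
  | nil => rfl
  | cons x xs ih =>
    simp only [List.length_cons, List.range_succ_eq_map, List.flatMap_cons, List.flatMap_map,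
      Nat.succ_eq_add_one, List.drop_succ_cons, List.drop_zero]
    rw [ih]
    rfl

lemma pvSubsA (lst : List Int) :
    (PySem.List.pyRange 0 (lst.length : Int) 1).foldl (fun subs i =>
      (PySem.List.pyRange (i + 1) ((lst.length : Int) + 1) 1).foldl (fun subs j =>
        let current := PySem.List.slice lst (some i) (some j)
        if pvAllPrime current then subs ++ [current] else subs) subs) []
    = pvSubsM lst := by
  simp only [PySem.List.foldl_append_if, PySem.List.foldl_append_eq_flatMap, List.nil_append]
  rw [PySem.List.pyRange_zero_nat lst.length, List.flatMap_map]
  rw [List.flatMap_congr (fun k hk => pvInner lst k (List.mem_range.mp hk))]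
  exact pvFlat lst

-- ---- the max over subarrays collapses to the max over runs ----
lemma pv_take_takeWhile (l : List Int) :
    l.take (l.takeWhile pvIsPrime).length = l.takeWhile pvIsPrime := by
  induction l with
  | nil => rfl
  | cons x xs ih =>
    cases hb : pvIsPrime x <;> simp [hb, ih]

lemma pv_sum_take_lt (l : List Int) (i j : Nat) (hij : i < j)
    (hj : j ≤ (l.takeWhile pvIsPrime).length) :
    (l.take i).sum < (l.take j).sum := by
  have hKlen : (l.takeWhile pvIsPrime).length ≤ l.length :=
    (l.takeWhile_sublist pvIsPrime).length_le
  have hjlen : j ≤ l.length := le_trans hj hKlen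
  have hdecomp : l.take j = l.take i ++ (l.drop i).take (j - i) := by
    have h1 := @List.take_add Int l i (j - i)
    rwa [show i + (j - i) = j by omega] at h1
  have hmidne : (l.drop i).take (j - i) ≠ [] := by
    apply List.ne_nil_of_length_pos
    simp only [List.length_take, List.length_drop]
    omega
  have hmem : ∀ x ∈ (l.drop i).take (j - i), 0 < x := by
    intro x hx
    have e1 : (l.drop i).take (j - i) =
        ((l.drop i).take ((l.takeWhile pvIsPrime).length - i)).take (j - i) := by
      rw [List.take_take, min_eq_left (by omega)]
    rw [e1] at hx
    have hx2 := List.mem_of_mem_take hx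
    rw [← List.drop_take] at hx2
    have hx3 := List.mem_of_mem_drop hx2
    rw [pv_take_takeWhile] at hx3
    have := pvIsPrime_two_le (List.mem_takeWhile_imp hx3)
    omega
  have hpos : 0 < ((l.drop i).take (j - i)).sum := List.sum_pos _ hmem hmidne
  rw [hdecomp, List.sum_append]
  omega

lemma pvCombine_none (M : Option (List Int)) : pvCombine none M = M := by
  cases M <;> rfl

lemma pvGrp_max (l : List Int) (h : l.takeWhile pvIsPrime ≠ []) :
    pvMax (pvGrp l) = some (l.takeWhile pvIsPrime) := by
  have hK : (l.takeWhile pvIsPrime).length ≠ 0 := by simpa using h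
  obtain ⟨K', hKdef⟩ : ∃ K', (l.takeWhile pvIsPrime).length = K' + 1 :=
    ⟨(l.takeWhile pvIsPrime).length - 1, by omega⟩
  have hlast : l.take (K' + 1) = l.takeWhile pvIsPrime := by
    rw [← hKdef]; exact pv_take_takeWhile l
  unfold pvGrp
  rw [hKdef, List.range_succ, List.map_append, pvMax_append, List.map_cons, List.map_nil]
  cases h1 : pvMax (List.map (fun k => l.take (k + 1)) (List.range K')) with
  | none => rw [pvCombine_none]; rw [show pvMax [l.take (K' + 1)] = some (l.take (K' + 1)) from rfl, hlast]
  | some m =>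
    obtain ⟨k, hkmem, hkeq⟩ := List.mem_map.mp (pvMax_mem h1)
    have hk : k < K' := List.mem_range.mp hkmem
    have hlt : m.sum < (l.take (K' + 1)).sum := by
      rw [← hkeq]
      exact pv_sum_take_lt l (k + 1) (K' + 1) (by omega) (le_of_eq hKdef.symm)
    rw [show pvMax [l.take (K' + 1)] = some (l.take (K' + 1)) from rfl]
    have hlt' : m.sum < (l.takeWhile pvIsPrime).sum := by rw [← hlast]; exact hlt
    simp only [pvCombine, hlast]
    rw [if_pos hlt']

def pvOMax (s : List Int) : Option (List Int) := if s = [] then none else some s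

lemma pvL (l : List Int) :
    pvMax (pvSubsM l) =
      pvCombine (pvOMax (l.takeWhile pvIsPrime)) (pvMax (pvSubsM (l.dropWhile pvIsPrime))) := by
  induction l with
  | nil => rfl
  | cons x xs ih =>
    cases hb : pvIsPrime x with
    | false =>
      have hgrp : pvGrp (x :: xs) = [] := by
        unfold pvGrp; simp [hb]
      rw [show pvSubsM (x :: xs) = pvGrp (x :: xs) ++ pvSubsM xs from rfl, hgrp, List.nil_append]
      rw [show (x :: xs).takeWhile pvIsPrime = [] from by simp [hb]]
      rw [show (x :: xs).dropWhile pvIsPrime = x :: xs from by simp [hb]]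
      rw [show pvOMax [] = none from rfl, pvCombine_none]
      rw [show pvSubsM (x :: xs) = pvGrp (x :: xs) ++ pvSubsM xs from rfl, hgrp, List.nil_append]
    | true =>
      have hw : (x :: xs).takeWhile pvIsPrime = x :: xs.takeWhile pvIsPrime := by
        simp [hb]
      have hd : (x :: xs).dropWhile pvIsPrime = xs.dropWhile pvIsPrime := by
        simp [hb]
      rw [show pvSubsM (x :: xs) = pvGrp (x :: xs) ++ pvSubsM xs from rfl, pvMax_append]
      rw [pvGrp_max (x :: xs) (by simp [hw])]
      rw [ih, hw, hd]
      rw [show pvOMax (x :: xs.takeWhile pvIsPrime) = some (x :: xs.takeWhile pvIsPrime) from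
        by simp [pvOMax]]
      cases hwx : xs.takeWhile pvIsPrime with
      | nil => rw [show pvOMax [] = none from rfl, pvCombine_none]
      | cons y ys =>
        rw [show pvOMax (y :: ys) = some (y :: ys) from by simp [pvOMax]]
        apply pvCombine_absorb
        have hx2 : 2 ≤ x := pvIsPrime_two_le hb
        simp only [List.sum_cons]
        omega

lemma pvMain : ∀ (n : Nat) (l : List Int), l.length ≤ n →
    pvMax (pvSubsM l) = pvMax (pvRunsFrom [] l) := by
  intro n
  induction n with
  | zero =>
    intro l hl
    have h0 : l = [] := List.eq_nil_of_length_eq_zero (by omega)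
    subst h0; rfl
  | succ n ih =>
    intro l hl
    cases l with
    | nil => rfl
    | cons x xs =>
      cases hb : pvIsPrime x with
      | false =>
        have hgrp : pvGrp (x :: xs) = [] := by
          unfold pvGrp; simp [hb]
        rw [show pvSubsM (x :: xs) = pvGrp (x :: xs) ++ pvSubsM xs from rfl, hgrp,
          List.nil_append]
        rw [show pvRunsFrom [] (x :: xs) = pvRunsFrom [] xs from by
          rw [pvRunsFrom]; simp [hb]]
        exact ih xs (by simp only [List.length_cons] at hl; omega)
      | true =>
        rw [pvL]
        rw [show (x :: xs).takeWhile pvIsPrime = x :: xs.takeWhile pvIsPrime from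
          by simp [hb]]
        rw [show (x :: xs).dropWhile pvIsPrime = xs.dropWhile pvIsPrime from
          by simp [hb]]
        rw [show pvRunsFrom [] (x :: xs) = pvRunsFrom [x] xs from by
          rw [pvRunsFrom]; simp [hb]]
        rw [pvRunsFrom_nonnil xs [x] (by simp), pvMax_cons]
        rw [show pvOMax (x :: xs.takeWhile pvIsPrime) =
          some (x :: xs.takeWhile pvIsPrime) from by simp [pvOMax]]
        rw [show ([x] ++ xs.takeWhile pvIsPrime) = x :: xs.takeWhile pvIsPrime from rfl]
        congr 1
        apply ih
        have h1 : (xs.dropWhile pvIsPrime).length ≤ xs.length :=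
          (xs.dropWhile_sublist pvIsPrime).length_le
        simp only [List.length_cons] at hl
        omega

-- ===== VERDICT (by name: the statement is the Claim_ definition above) =====
theorem max_sum_of_prime_sub_spec : Claim_equal_max_sum_of_prime_sub := by
  intro lst _ _
  unfold Spec_max_sum_of_prime_sub max_sum_of_prime_sub max_sum_of_prime_sub_alt
  have hB := pvB_fold lst [] []
  rw [List.nil_append] at hB
  unfold pvFinish at hB
  simp only [pvSubsA, pv_max?_eq]
  rw [hB, pvMain lst.length lst (le_refl _)]
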